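-- pv_equiv track=rewrite | github.com/moskalenkoalina2006-oss/- | 777.py | fix_punctuation_spaces
-- ===== SOURCE A (Python) =====
-- def fix_punctuation_spaces(text):
--     result = []
--     fixed = False
--
--     for i in range(len(text)):
--         char = text[i]
--         result.append(char)
--
--         # Если текущий символ - знак препинания
--         if char in ',.!?':
--             # Проверяем следующий символ (если он есть)
--             if i + 1 < len(text):
--                 next_char = text[i + 1]
--
--                 # Если следующий символ не пробел и не другой знак препинания
--                 if next_char != ' ' and next_char not in ',.!?':
--                     result.append(' ')  # Добавляем пробел
--                     fixed = True
--
--     return ''.join(result), fixed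
-- ===== SOURCE B (Python) =====
-- PUNCT = ',.!?'
--
-- def fix_punctuation_spaces(text):
--     # Chunk scanner: jump from punctuation mark to punctuation mark with str.find,
--     # copying whole punctuation-free slices at once; flag = whether anything changed.
--     parts = []
--     i = 0
--     n = len(text)
--     while i < n:
--         hits = [k for k in (text.find(p, i) for p in PUNCT) if k != -1]
--         if not hits:
--             parts.append(text[i:])
--             break
--         j = min(hits)
--         parts.append(text[i:j + 1])
--         if j + 1 < n and text[j + 1] != ' ' and text[j + 1] not in PUNCT:
--             parts.append(' ')
--         i = j + 1
--     result = ''.join(parts)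
--     return result, result != text
-- ===== Notes on version B (the rewrite author's own statement) =====
-- stated objective: alternative
-- what changed: Replaces A's char-by-char indexed loop by a chunk scanner: a while loop that jumps to the next punctuation mark via str.find, copies whole punctuation-free slices at once, and derives the fixed flag from result != text instead of tracking it per character.
import Mathlib
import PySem

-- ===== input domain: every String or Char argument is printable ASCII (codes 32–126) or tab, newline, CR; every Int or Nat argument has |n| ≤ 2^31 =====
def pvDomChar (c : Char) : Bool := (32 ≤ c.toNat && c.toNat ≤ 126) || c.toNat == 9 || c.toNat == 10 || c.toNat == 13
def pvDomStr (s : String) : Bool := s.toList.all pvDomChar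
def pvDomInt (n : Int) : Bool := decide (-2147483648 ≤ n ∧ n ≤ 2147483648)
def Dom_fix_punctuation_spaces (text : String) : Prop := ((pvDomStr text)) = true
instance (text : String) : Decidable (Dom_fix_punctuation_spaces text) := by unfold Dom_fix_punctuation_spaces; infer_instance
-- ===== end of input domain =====

-- B replaces A's char-by-char loop by a chunk scanner: it jumps from punctuation
-- mark to punctuation mark with str.find, copies whole punctuation-free slices at
-- once, and derives the flag from result != text (alternative algorithm, same result).

-- ===== PORT A =====
-- the punctuation characters of the string ',.!?'
def pvPunct : List Char := [',', '.', '!', '?']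

-- A's loop body for one index i (append char; maybe append a space and set fixed)
def pvStepA (cs : List Char) (acc : List Char × Bool) (i : Int) : List Char × Bool :=
  match PySem.List.pyGet? cs i with
  | none => acc  -- unreachable: i ranges over range(len(text))
  | some char =>
    let acc1 := (acc.1 ++ [char], acc.2)
    if char ∈ pvPunct then
      if i + 1 < (cs.length : Int) then
        match PySem.List.pyGet? cs (i + 1) with
        | none => acc1  -- unreachable: i + 1 < len
        | some next_char =>
          if next_char ≠ ' ' ∧ next_char ∉ pvPunct then (acc1.1 ++ [' '], true) else acc1
      else acc1
    else acc1

def fix_punctuation_spaces (text : String) : String × Bool :=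
  let cs := text.toList
  let st := (PySem.List.pyRange 0 cs.length 1).foldl (pvStepA cs) ([], false)
  (String.ofList st.1, st.2)

-- ===== PORT B =====
-- hits = [k for k in (text.find(p, i) for p in PUNCT) if k != -1]
def pvFindNext (cs : List Char) (i : Nat) : List Int :=
  (pvPunct.map (fun p => PySem.Chars.findFrom cs [p] (i : Int) none)).filter (fun k => k != -1)

-- termination fact for the while loop: the next punctuation index is ≥ i
theorem pvFindNext_min_ge (cs : List Char) (i : Nat) (hi : i ≤ cs.length) (j : Int)
    (hm : PySem.List.min? (pvFindNext cs i) (fun x => x) = some j) : (i : Int) ≤ j := by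
  have hjmem : j ∈ pvFindNext cs i := PySem.List.min?_mem hm
  unfold pvFindNext at hjmem
  rcases List.mem_filter.mp hjmem with ⟨hmap, hne⟩
  rcases List.mem_map.mp hmap with ⟨p, hp, hfe⟩
  have hne' : j ≠ -1 := by simpa using hne
  have := (PySem.Chars.findFrom_natCast_spec cs [p] i hi (by rw [hfe]; exact hne')).1
  rw [hfe] at this
  exact this

-- the while loop over i, accumulating the parts list
def pvChunkLoop (cs : List Char) (i : Nat) : List (List Char) :=
  if h : i < cs.length then
    match hm : PySem.List.min? (pvFindNext cs i) (fun x => x) with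
    | none => [PySem.List.slice cs (some (i : Int)) none]   -- parts.append(text[i:]); break
    | some j =>
        PySem.List.slice cs (some (i : Int)) (some (j + 1))
          :: ((if j + 1 < (cs.length : Int) then
                 match PySem.List.pyGet? cs (j + 1) with
                 | some nc => if nc ≠ ' ' ∧ nc ∉ pvPunct then [[' ']] else []
                 | none => []
               else [])
              ++ pvChunkLoop cs (j + 1).toNat)
  else []
termination_by cs.length - i
decreasing_by
  have h1 := pvFindNext_min_ge cs i (le_of_lt h) j hm
  omega

def fix_punctuation_spaces_alt (text : String) : String × Bool :=
  let result := String.ofList (pvChunkLoop text.toList 0).flatten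
  (result, result != text)

-- ===== PRECONDITION & SPEC =====
def Spec_fix_punctuation_spaces (text : String) (out : String × Bool) : Prop := out = fix_punctuation_spaces_alt text
instance (text : String) (out : String × Bool) : Decidable (Spec_fix_punctuation_spaces text out) := by unfold Spec_fix_punctuation_spaces; infer_instance

-- ===== CLAIM (what is proved, stated in full; the proofs are below) =====
def Claim_equal_fix_punctuation_spaces : Prop := ∀ (text : String), Dom_fix_punctuation_spaces text → Spec_fix_punctuation_spaces text (fix_punctuation_spaces text)

-- ===== LEMMAS AND PROOFS =====

-- ---- generic machinery: both programs emit, per character, the character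
-- plus possibly one space; pvGo is that canonical output, pvFg whether a space was added
def pvGoPiece (c : Char) (tl : List Char) : List Char × Bool :=
  match tl with
  | [] => ([c], false)
  | n :: _ => if c ∈ pvPunct ∧ n ≠ ' ' ∧ n ∉ pvPunct then ([c, ' '], true) else ([c], false)

def pvGo : List Char → List Char
  | [] => []
  | c :: tl => (pvGoPiece c tl).1 ++ pvGo tl

def pvFg : List Char → Bool
  | [] => false
  | c :: tl => (pvGoPiece c tl).2 || pvFg tl

theorem pvFoldlCongr {α β : Type} (l : List β) (f g : α → β → α)
    (h : ∀ s x, x ∈ l → f s x = g s x) : ∀ init, l.foldl f init = l.foldl g init := by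
  induction l with
  | nil => intro _; rfl
  | cons x xs ih =>
    intro init
    simp only [List.foldl_cons]
    rw [h init x (by simp)]
    exact ih (fun s y hy => h s y (by simp [hy])) _

theorem pvStepA_shift (c : Char) (tl : List Char) (s : List Char × Bool) (k : Nat) :
    pvStepA (c :: tl) s (1 + (k : Int)) = pvStepA tl s (k : Int) := by
  unfold pvStepA
  have h1 : PySem.List.pyGet? (c :: tl) (1 + (k : Int)) = PySem.List.pyGet? tl k := by
    rw [add_comm, PySem.List.pyGet?_cons_succ]
  have h2 : PySem.List.pyGet? (c :: tl) (1 + (k : Int) + 1)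
      = PySem.List.pyGet? tl ((k : Int) + 1) := by
    have he : (1 + (k : Int) + 1) = (((k + 1 : Nat) : Int) + 1) := by push_cast; ring
    rw [he, PySem.List.pyGet?_cons_succ]; push_cast; rfl
  have h3 : (1 + (k : Int) + 1 < ((c :: tl).length : Int)) ↔ ((k : Int) + 1 < (tl.length : Int)) := by
    simp only [List.length_cons]; push_cast; omega
  rw [h1, h2]
  rcases hget : PySem.List.pyGet? tl (k : Int) with _ | ch
  · rfl
  · by_cases hc : ch ∈ pvPunct
    · by_cases hlt : (k : Int) + 1 < (tl.length : Int)
      · simp only [hc, if_pos, if_pos (h3.mpr hlt), if_pos hlt]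
      · simp only [hc, if_pos, if_neg (fun h => hlt (h3.mp h)), if_neg hlt]
    · simp only [if_neg hc]

theorem pvStepA_zero (c : Char) (tl : List Char) (s : List Char × Bool) :
    pvStepA (c :: tl) s 0 = (s.1 ++ (pvGoPiece c tl).1, s.2 || (pvGoPiece c tl).2) := by
  unfold pvStepA pvGoPiece
  rw [PySem.List.pyGet?_zero_cons]
  rcases tl with _ | ⟨n, rest⟩
  · by_cases hc : c ∈ pvPunct <;> simp [hc]
  · have hnext : PySem.List.pyGet? (c :: n :: rest) ((0 : Int) + 1) = some n := by
      rw [show ((0 : Int) + 1) = (((0 : Nat) : Int) + 1) by norm_num,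
        PySem.List.pyGet?_cons_succ]
      simp
    have hlen : ((0 : Int) + 1 < ((c :: n :: rest).length : Int)) := by
      simp only [List.length_cons]; push_cast; omega
    by_cases hc : c ∈ pvPunct
    · by_cases hn : n ≠ ' ' ∧ n ∉ pvPunct
      · simp [hc, hn]
      · simp [hc, hn]
    · simp [hc]

theorem pvFoldA (cs : List Char) : ∀ (acc : List Char) (flag : Bool),
    (PySem.List.pyRange 0 cs.length 1).foldl (pvStepA cs) (acc, flag)
      = (acc ++ pvGo cs, flag || pvFg cs) := by
  induction cs with
  | nil => intro acc flag; simp [PySem.List.pyRange_one_eq_nil, pvGo, pvFg]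
  | cons c tl ih =>
    intro acc flag
    have hlen : ((c :: tl).length : Int) = (tl.length : Int) + 1 := by
      simp only [List.length_cons]; push_cast; ring
    have hcons : PySem.List.pyRange 0 ((c :: tl).length : Int) 1
        = 0 :: PySem.List.pyRange 1 ((c :: tl).length : Int) 1 := by
      apply PySem.List.pyRange_one_cons; rw [hlen]; omega
    have ht : (((c :: tl).length : Int) - 1).toNat = tl.length := by
      rw [hlen]; omega
    have ht0 : (((tl.length : Nat) : Int) - 0).toNat = tl.length := by omega
    have hshift : PySem.List.pyRange 1 ((c :: tl).length : Int) 1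
        = (PySem.List.pyRange 0 ((tl.length : Nat) : Int) 1).map (fun i => 1 + i) := by
      rw [PySem.List.pyRange_one, PySem.List.pyRange_one, ht, ht0, List.map_map]
      simp
    rw [hcons]
    simp only [List.foldl_cons]
    rw [pvStepA_zero, hshift, List.foldl_map]
    have hcg : ∀ (s : List Char × Bool) (i : Int),
        i ∈ PySem.List.pyRange 0 ((tl.length : Nat) : Int) 1 →
        pvStepA (c :: tl) s (1 + i) = pvStepA tl s i := by
      intro s i hi
      have h0 : 0 ≤ i := (PySem.List.mem_pyRange_one.mp hi).1
      lift i to Nat using h0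
      exact pvStepA_shift c tl s i
    rw [pvFoldlCongr _ _ (pvStepA tl) hcg]
    rw [ih (acc ++ (pvGoPiece c tl).1) (flag || (pvGoPiece c tl).2)]
    simp [pvGo, pvFg, Bool.or_assoc]

theorem pvGoPiece_len (c : Char) (tl : List Char) : 1 ≤ (pvGoPiece c tl).1.length := by
  unfold pvGoPiece
  rcases tl with _ | ⟨n, _⟩
  · simp
  · by_cases h : c ∈ pvPunct ∧ n ≠ ' ' ∧ n ∉ pvPunct <;> simp [h]

theorem pvGo_length (cs : List Char) : cs.length ≤ (pvGo cs).length := by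
  induction cs with
  | nil => simp [pvGo]
  | cons c tl ih =>
    have h1 := pvGoPiece_len c tl
    simp only [pvGo, List.length_append, List.length_cons]
    omega

theorem pvFg_iff (cs : List Char) : pvFg cs = true ↔ pvGo cs ≠ cs := by
  induction cs with
  | nil => simp [pvFg, pvGo]
  | cons c tl ih =>
    simp only [pvFg, pvGo]
    rcases tl with _ | ⟨n, rest⟩
    · simp [pvGoPiece, pvGo, pvFg]
    · rw [show pvGoPiece c (n :: rest)
          = if c ∈ pvPunct ∧ n ≠ ' ' ∧ n ∉ pvPunct then ([c, ' '], true) else ([c], false)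
          from rfl]
      by_cases h : c ∈ pvPunct ∧ n ≠ ' ' ∧ n ∉ pvPunct
      · simp only [if_pos h, Bool.true_or, true_iff]
        intro heq
        have hlc := congrArg List.length heq
        have hlen := pvGo_length (n :: rest)
        simp only [List.length_append, List.length_cons] at hlc hlen
        omega
      · simp only [if_neg h, Bool.false_or, List.cons_append, List.nil_append]
        rw [ih]
        constructor
        · intro hne heq
          injection heq with _ h2
          exact hne h2
        · intro hne heq
          exact hne (by rw [heq])

theorem pvFg_eq (cs : List Char) : pvFg cs = decide (pvGo cs ≠ cs) := by
  by_cases h : pvGo cs = cs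
  · have hf : pvFg cs ≠ true := fun ht => ((pvFg_iff cs).mp ht) h
    simp only [Bool.not_eq_true] at hf
    simp [h, hf]
  · simp [h, (pvFg_iff cs).mpr h]

-- ---- B-side machinery: characterising the chunk scanner

theorem pv_singleton_prefix_iff (a : Char) (l : List Char) : [a] <+: l ↔ l.head? = some a := by
  cases l with
  | nil => simp
  | cons b t => simp [List.cons_prefix_cons, eq_comm]

theorem pv_singleton_infix_iff (a : Char) (l : List Char) : [a] <:+: l ↔ a ∈ l := by
  constructor
  · intro h
    exact h.sublist.subset (by simp)
  · intro h
    rcases List.append_of_mem h with ⟨s, t, rfl⟩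
    exact ⟨s, t, by simp⟩

theorem pv_find_not_mem (s : List Char) (p : Char) (h : p ∉ s) :
    PySem.Chars.find s [p] = -1 := by
  rw [PySem.Chars.find_eq_neg_one_iff, pv_singleton_infix_iff]
  exact h

theorem pv_find_eq (s : List Char) (p : Char) (d : Nat)
    (h1 : s[d]? = some p) (h2 : ∀ m, m < d → s[m]? ≠ some p) :
    PySem.Chars.find s [p] = (d : Int) := by
  have hpmem : p ∈ s := List.mem_of_getElem? h1
  have hnn : 0 ≤ PySem.Chars.find s [p] :=
    (PySem.Chars.find_nonneg_iff s [p]).mpr ((pv_singleton_infix_iff p s).mpr hpmem)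
  obtain ⟨hpre, hminf⟩ := PySem.Chars.find_spec hnn
  have hth : s[(PySem.Chars.find s [p]).toNat]? = some p := by
    rw [← List.head?_drop]
    exact (pv_singleton_prefix_iff p _).mp hpre
  have h3 : ¬ (PySem.Chars.find s [p]).toNat < d := fun hlt => h2 _ hlt hth
  have h4 : ¬ d < (PySem.Chars.find s [p]).toNat := by
    intro hlt
    exact hminf d hlt ((pv_singleton_prefix_iff p _).mpr (by rw [List.head?_drop]; exact h1))
  omega

-- index of the first punctuation character of a list, if any
def pvFirstP : List Char → Option Nat
  | [] => none
  | c :: t => if c ∈ pvPunct then some 0 else (pvFirstP t).map (· + 1)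

theorem pvFirstP_none (s : List Char) (h : pvFirstP s = none) : ∀ c ∈ s, c ∉ pvPunct := by
  induction s with
  | nil => intro c hc; simp at hc
  | cons a t ih =>
    intro c hc
    by_cases ha : a ∈ pvPunct
    · simp [pvFirstP, ha] at h
    · unfold pvFirstP at h
      rw [if_neg ha] at h
      rcases List.mem_cons.mp hc with rfl | hct
      · exact ha
      · exact ih (by simpa using h) c hct

theorem pvFirstP_some (s : List Char) (d : Nat) (h : pvFirstP s = some d) :
    (∃ p ∈ pvPunct, s[d]? = some p) ∧ ∀ m, m < d → ∀ c, s[m]? = some c → c ∉ pvPunct := by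
  induction s generalizing d with
  | nil => simp [pvFirstP] at h
  | cons a t ih =>
    by_cases ha : a ∈ pvPunct
    · unfold pvFirstP at h
      rw [if_pos ha] at h
      obtain rfl : d = 0 := by simpa using h.symm
      exact ⟨⟨a, ha, by simp⟩, fun m hm => by omega⟩
    · unfold pvFirstP at h
      rw [if_neg ha] at h
      rcases Option.map_eq_some_iff.mp h with ⟨d', hd', rfl⟩
      obtain ⟨⟨p, hp, hpe⟩, hmin⟩ := ih d' hd'
      refine ⟨⟨p, hp, by simpa using hpe⟩, ?_⟩
      intro m hm c hc
      cases m with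
      | zero =>
        simp at hc
        exact hc ▸ ha
      | succ k =>
        exact hmin k (by omega) c (by simpa using hc)

theorem pvFindNext_empty (cs : List Char) (i : Nat) (hi : i ≤ cs.length)
    (h : pvFirstP (cs.drop i) = none) : pvFindNext cs i = [] := by
  unfold pvFindNext
  apply List.filter_eq_nil_iff.mpr
  intro a ha
  rcases List.mem_map.mp ha with ⟨p, hp, rfl⟩
  rw [PySem.Chars.findFrom_natCast cs [p] i hi]
  have hnm : p ∉ cs.drop i := fun hmem => pvFirstP_none _ h p hmem hp
  rw [if_pos (pv_find_not_mem _ _ hnm)]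
  simp

theorem pvFindNext_min (cs : List Char) (i : Nat) (hi : i ≤ cs.length) (d : Nat)
    (hfp : pvFirstP (cs.drop i) = some d) :
    PySem.List.min? (pvFindNext cs i) (fun x => x) = some ((i : Int) + (d : Int)) := by
  obtain ⟨⟨p, hp, hpe⟩, hmin⟩ := pvFirstP_some _ d hfp
  have hfind : PySem.Chars.find (cs.drop i) [p] = (d : Int) := by
    apply pv_find_eq _ _ _ hpe
    intro m hm hme
    exact hmin m hm p hme hp
  -- membership of i + d
  have hmem : ((i : Int) + (d : Int)) ∈ pvFindNext cs i := by
    unfold pvFindNext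
    apply List.mem_filter.mpr
    constructor
    · apply List.mem_map.mpr
      refine ⟨p, hp, ?_⟩
      rw [PySem.Chars.findFrom_natCast cs [p] i hi, hfind]
      rw [if_neg (by omega : ¬ ((d : Int) = -1))]
    · simp only [bne_iff_ne, ne_eq]
      omega
  -- lower bound
  have hlb : ∀ x ∈ pvFindNext cs i, (i : Int) + (d : Int) ≤ x := by
    intro x hx
    unfold pvFindNext at hx
    rcases List.mem_filter.mp hx with ⟨hxm, hxne⟩
    rcases List.mem_map.mp hxm with ⟨q, hq, rfl⟩
    rw [PySem.Chars.findFrom_natCast cs [q] i hi] at hxne ⊢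
    by_cases hf1 : PySem.Chars.find (cs.drop i) [q] = -1
    · rw [if_pos hf1] at hxne; simp at hxne
    · rw [if_neg hf1]
      have hnn : 0 ≤ PySem.Chars.find (cs.drop i) [q] := by
        have := PySem.Chars.neg_one_le_find (cs.drop i) [q]
        omega
      obtain ⟨hpre, _⟩ := PySem.Chars.find_spec hnn
      have hqe : (cs.drop i)[(PySem.Chars.find (cs.drop i) [q]).toNat]? = some q := by
        rw [← List.head?_drop]
        exact (pv_singleton_prefix_iff q _).mp hpre
      have hge : ¬ (PySem.Chars.find (cs.drop i) [q]).toNat < d :=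
        fun hlt => hmin _ hlt q hqe hq
      omega
  rcases hm : PySem.List.min? (pvFindNext cs i) (fun x => x) with _ | m
  · rw [PySem.List.min?_eq_none_iff] at hm
    rw [hm] at hmem
    simp at hmem
  · have h1 := hlb m (PySem.List.min?_mem hm)
    have h2 := PySem.List.min?_isMin hm _ hmem
    have : m = (i : Int) + (d : Int) := le_antisymm h2 h1
    rw [this]

-- pvGo passes a punctuation-free prefix through unchanged
theorem pvGoPiece_nopunct (c : Char) (tl : List Char) (hc : c ∉ pvPunct) :
    pvGoPiece c tl = ([c], false) := by
  rcases tl with _ | ⟨n, t⟩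
  · rfl
  · show (if c ∈ pvPunct ∧ n ≠ ' ' ∧ n ∉ pvPunct then ([c, ' '], true) else ([c], false))
        = ([c], false)
    rw [if_neg (fun h => hc h.1)]

theorem pvGo_append_nopunct (X r : List Char) (h : ∀ c ∈ X, c ∉ pvPunct) :
    pvGo (X ++ r) = X ++ pvGo r := by
  induction X with
  | nil => simp
  | cons c X' ih =>
    simp only [List.cons_append]
    rw [show pvGo (c :: (X' ++ r)) = (pvGoPiece c (X' ++ r)).1 ++ pvGo (X' ++ r) from rfl]
    rw [pvGoPiece_nopunct c _ (h c (by simp)), ih (fun x hx => h x (by simp [hx]))]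
    simp

-- the chunk scanner computes pvGo of the remaining suffix
theorem pvChunk_eq (n : Nat) : ∀ (cs : List Char) (i : Nat), cs.length - i = n → i ≤ cs.length →
    (pvChunkLoop cs i).flatten = pvGo (cs.drop i) := by
  induction n using Nat.strong_induction_on with
  | _ n ih =>
  intro cs i hn hi
  rw [pvChunkLoop]
  by_cases h : i < cs.length
  · rw [dif_pos h]
    rcases hfp : pvFirstP (cs.drop i) with _ | d
    · -- no punctuation left: one final chunk
      have hnil : pvFindNext cs i = [] := pvFindNext_empty cs i hi hfp
      have hm0 : PySem.List.min? (pvFindNext cs i) (fun x => x) = none := by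
        rw [PySem.List.min?_eq_none_iff]; exact hnil
      split
      · rw [PySem.List.slice_from_natCast]
        have := pvGo_append_nopunct (cs.drop i) [] (pvFirstP_none _ hfp)
        simp only [List.append_nil] at this
        simp [this, pvGo]
      · rename_i j hm
        rw [hm0] at hm
        exact absurd hm (by simp)
    · -- punctuation at relative index d
      obtain ⟨⟨p, hp, hpe⟩, hmin⟩ := pvFirstP_some _ d hfp
      have hmv := pvFindNext_min cs i hi d hfp
      split
      · rename_i hm
        rw [hmv] at hm
        exact absurd hm (by simp)
      · rename_i j hm
        rw [hmv] at hm
        obtain rfl : j = (i : Int) + (d : Int) := by injection hm with h'; exact h'.symm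
        have hdlen : d < (cs.drop i).length := by
          have := List.getElem?_eq_some_iff.mp hpe
          exact this.1
        have hJlen : i + d < cs.length := by
          rw [List.length_drop] at hdlen; omega
        -- the copied slice is take d ++ [p]
        have hslice : PySem.List.slice cs (some (i : Int)) (some ((i : Int) + (d : Int) + 1))
            = (cs.drop i).take d ++ [p] := by
          rw [show ((i : Int) + (d : Int) + 1) = (((i + d + 1 : Nat)) : Int) by push_cast; ring,
            PySem.List.slice_natCast]
          rw [show i + d + 1 - i = d + 1 by omega, List.take_add_one, hpe]
          rfl
        -- the prefix before the punctuation mark is punctuation-free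
        have hXfree : ∀ c ∈ (cs.drop i).take d, c ∉ pvPunct := by
          intro c hc
          obtain ⟨m, hm1, hm2⟩ := List.getElem_of_mem hc
          have hmd : m < d := by
            have := hm1
            simp only [List.length_take, lt_min_iff] at this
            exact this.1
          apply hmin m hmd c
          rw [← hm2, List.getElem_take]
          rw [List.getElem?_eq_getElem (by omega)]
        -- decompose the suffix
        have hdecomp : cs.drop i = (cs.drop i).take d ++ (p :: cs.drop (i + d + 1)) := by
          have h2 : (cs.drop i).drop d = p :: cs.drop (i + d + 1) := by
            rw [List.drop_eq_getElem_cons hdlen]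
            congr 1
            · rcases List.getElem?_eq_some_iff.mp hpe with ⟨_, he⟩
              exact he
            · rw [List.drop_drop, Nat.add_assoc]
          conv_lhs => rw [← List.take_append_drop d (cs.drop i)]
          rw [h2]
        -- the recursive call
        have hrec : (pvChunkLoop cs ((i : Int) + (d : Int) + 1).toNat).flatten
            = pvGo (cs.drop (i + d + 1)) := by
          have htn : ((i : Int) + (d : Int) + 1).toNat = i + d + 1 := by omega
          rw [htn]
          exact ih (cs.length - (i + d + 1)) (by omega) cs (i + d + 1) rfl (by omega)
        -- the space insertion matches pvGoPiece
        rw [List.flatten_cons, List.flatten_append, hrec, hslice]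
        conv_rhs => rw [hdecomp]
        rw [pvGo_append_nopunct _ _ hXfree]
        rw [show pvGo (p :: cs.drop (i + d + 1))
            = (pvGoPiece p (cs.drop (i + d + 1))).1 ++ pvGo (cs.drop (i + d + 1)) from rfl]
        rcases hR : cs.drop (i + d + 1) with _ | ⟨nc, rest⟩
        · -- the punctuation mark is the last character
          have hlen : cs.length ≤ i + d + 1 := by
            have := congrArg List.length hR
            rw [List.length_drop] at this
            simp at this
            omega
          rw [if_neg (by omega : ¬ ((i : Int) + (d : Int) + 1 < (cs.length : Int)))]
          simp [pvGoPiece]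
        · -- there is a next character
          have hlen2 : i + d + 1 < cs.length := by
            have := congrArg List.length hR
            rw [List.length_drop] at this
            simp at this
            omega
          have hget : PySem.List.pyGet? cs ((i : Int) + (d : Int) + 1) = some nc := by
            rw [show ((i : Int) + (d : Int) + 1) = (((i + d + 1 : Nat)) : Int) by push_cast; ring]
            rw [PySem.List.pyGet?_natCast]
            rw [← List.head?_drop, hR]
            rfl
          rw [if_pos (by omega : ((i : Int) + (d : Int) + 1 < (cs.length : Int)))]
          rw [hget]
          by_cases hcnd : nc ≠ ' ' ∧ nc ∉ pvPunct
          · have h5 : p ∈ pvPunct ∧ nc ≠ ' ' ∧ nc ∉ pvPunct := ⟨hp, hcnd.1, hcnd.2⟩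
            simp [pvGoPiece, hcnd, h5]
          · simp [pvGoPiece, hcnd]
  · rw [dif_neg h]
    rw [List.drop_eq_nil_of_le (by omega)]
    simp [pvGo]

-- ===== VERDICT (by name: the statement is the Claim_ definition above) =====
theorem fix_punctuation_spaces_spec : Claim_equal_fix_punctuation_spaces := by
  intro text _
  unfold Spec_fix_punctuation_spaces fix_punctuation_spaces fix_punctuation_spaces_alt
  simp only
  rw [pvFoldA, pvChunk_eq (text.toList.length - 0) text.toList 0 rfl (by omega)]
  simp only [List.drop_zero, List.nil_append, Bool.false_or, Prod.mk.injEq]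
  refine ⟨trivial, ?_⟩
  rw [pvFg_eq]
  by_cases h : pvGo text.toList = text.toList
  · have hs : String.ofList (pvGo text.toList) = text := by
      rw [h]; simp
    rw [hs]; simp [h]
  · have hs : String.ofList (pvGo text.toList) ≠ text := by
      intro heq
      apply h
      have := congrArg String.toList heq
      simpa using this
    simp [h, hs]
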